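-- pv_equiv track=rewrite | github.com/denial-of-service/AdventOfCode | src/year_2015/day_05.py | contains_three_vowels
-- ===== SOURCE A (Python) =====
-- def contains_three_vowels(s: str) -> bool:
--     count: int = 0
--     vowels: list[str] = ['a', 'e', 'i', 'o', 'u']
--     for char in s:
--         if char in vowels:
--             count += 1
--             if count >= 3:
--                 return True
--     return False
-- ===== SOURCE B (Python) =====
-- def contains_three_vowels(s: str) -> bool:
--     return sum(s.count(v) for v in 'aeiou') >= 3
-- ===== Notes on version B (the rewrite author's own statement) =====
-- stated objective: idiomatic
-- what changed: Replaces A's single character-by-character scan with an early exit at 3 by one str.count scan of s per vowel, summing the five counts in a single expression.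
import Mathlib
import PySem

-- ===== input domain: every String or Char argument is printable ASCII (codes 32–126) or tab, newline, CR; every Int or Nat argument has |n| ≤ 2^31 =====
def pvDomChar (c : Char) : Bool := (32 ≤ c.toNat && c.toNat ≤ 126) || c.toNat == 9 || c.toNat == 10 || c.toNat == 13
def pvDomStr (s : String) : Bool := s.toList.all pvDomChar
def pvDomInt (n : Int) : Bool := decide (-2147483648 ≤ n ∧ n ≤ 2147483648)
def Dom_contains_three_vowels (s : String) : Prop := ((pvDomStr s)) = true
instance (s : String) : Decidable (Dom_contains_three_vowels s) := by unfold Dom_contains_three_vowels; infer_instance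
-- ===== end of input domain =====

-- B replaces A's single scan with early exit by one str.count pass per vowel, summed (idiomatic one-liner).

-- ===== PORT A =====
def pvVowels : List Char := ['a', 'e', 'i', 'o', 'u']

def pvLoopA : List Char → Int → Bool
  | [], _ => false
  | c :: cs, count =>
    if c ∈ pvVowels then
      if 3 ≤ count + 1 then true else pvLoopA cs (count + 1)
    else pvLoopA cs count

def contains_three_vowels (s : String) : Bool := pvLoopA s.toList 0

-- ===== PORT B =====
def contains_three_vowels_alt (s : String) : Bool :=
  decide (3 ≤ (['a', 'e', 'i', 'o', 'u'].foldl
    (fun acc v => acc + (PySem.Str.count s (String.ofList [v]) : Int)) 0))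

-- ===== PRECONDITION & SPEC =====
def Spec_contains_three_vowels (s : String) (out : Bool) : Prop := out = contains_three_vowels_alt s
instance (s : String) (out : Bool) : Decidable (Spec_contains_three_vowels s out) := by unfold Spec_contains_three_vowels; infer_instance

-- ===== CLAIM (what is proved, stated in full; the proofs are below) =====
def Claim_equal_contains_three_vowels : Prop := ∀ (s : String), Dom_contains_three_vowels s → Spec_contains_three_vowels s (contains_three_vowels s)

-- ===== LEMMAS AND PROOFS =====

-- Chars.count.go with a single-character pattern counts occurrences of that character.
theorem pv_count_go_singleton (v : Char) (l : List Char) (fuel : Nat) (acc : Nat)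
    (h : l.length ≤ fuel) :
    PySem.Chars.count.go [v] fuel l acc = acc + l.count v := by
  induction l generalizing fuel acc with
  | nil =>
    cases fuel <;> simp [PySem.Chars.count.go]
  | cons c cs ih =>
    cases fuel with
    | zero => simp at h
    | succ fuel =>
      by_cases hv : v = c
      · subst hv
        have hstep : PySem.Chars.count.go [v] (fuel + 1) (v :: cs) acc
            = PySem.Chars.count.go [v] fuel cs (acc + 1) := by
          simp [PySem.Chars.count.go, List.isPrefixOf]
        rw [hstep, ih fuel (acc + 1) (by simpa using h), List.count_cons_self]
        omega
      · have hb : (v == c) = false := by simpa using hv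
        have hstep : PySem.Chars.count.go [v] (fuel + 1) (c :: cs) acc
            = PySem.Chars.count.go [v] fuel cs acc := by
          simp [PySem.Chars.count.go, List.isPrefixOf, hb]
        rw [hstep, ih fuel acc (by simpa using h), List.count_cons_of_ne (Ne.symm hv)]

theorem pv_count_singleton (v : Char) (l : List Char) :
    PySem.Chars.count l [v] = l.count v := by
  simpa [PySem.Chars.count] using pv_count_go_singleton v l l.length 0 le_rfl

-- countP over the vowel set is the sum of the five individual counts.
theorem pv_countP_vowels (l : List Char) :
    (l.countP (fun c => decide (c ∈ pvVowels)))
      = l.count 'a' + l.count 'e' + l.count 'i' + l.count 'o' + l.count 'u' := by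
  induction l with
  | nil => simp
  | cons c cs ih =>
    simp only [List.countP_cons, List.count_cons, ih]
    by_cases h : c ∈ pvVowels
    · fin_cases h <;> simp [pvVowels] <;> omega
    · have hm : ∀ v, v ∈ pvVowels → ¬ c = v := fun v hv e => h (e ▸ hv)
      have ha := hm 'a' (by simp [pvVowels]); have he := hm 'e' (by simp [pvVowels])
      have hi := hm 'i' (by simp [pvVowels]); have ho := hm 'o' (by simp [pvVowels])
      have hu := hm 'u' (by simp [pvVowels])
      simp [h, ha, he, hi, ho, hu]

-- A's early-exit loop, started at or below 2, decides whether the total vowel count reaches 3.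
theorem pv_loopA_eq (l : List Char) (k : Int) (hk : k ≤ 2) :
    pvLoopA l k = decide (3 ≤ k + (l.countP (fun c => decide (c ∈ pvVowels)) : Int)) := by
  induction l generalizing k with
  | nil => simp [pvLoopA]; omega
  | cons c cs ih =>
    by_cases h : c ∈ pvVowels
    · have hcp : (c :: cs).countP (fun c => decide (c ∈ pvVowels))
          = cs.countP (fun c => decide (c ∈ pvVowels)) + 1 := by
        simp [h]
      by_cases h3 : (3 : Int) ≤ k + 1
      · simp only [pvLoopA, if_pos h, if_pos h3, hcp]
        rw [eq_comm, decide_eq_true_eq]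
        push_cast
        omega
      · simp only [pvLoopA, if_pos h, if_neg h3, hcp]
        rw [ih (k + 1) (by omega), decide_eq_decide]
        push_cast
        omega
    · have hcp : (c :: cs).countP (fun c => decide (c ∈ pvVowels))
          = cs.countP (fun c => decide (c ∈ pvVowels)) := by
        simp [h]
      simp only [pvLoopA, if_neg h, hcp]
      exact ih k hk

-- ===== VERDICT (by name: the statement is the Claim_ definition above) =====
theorem contains_three_vowels_spec : Claim_equal_contains_three_vowels := by
  intro s _
  unfold Spec_contains_three_vowels contains_three_vowels contains_three_vowels_alt
  rw [pv_loopA_eq s.toList 0 (by norm_num)]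
  simp only [List.foldl, PySem.Str.count_eq]
  have hc : ∀ v : Char, PySem.Chars.count s.toList (String.ofList [v]).toList = s.toList.count v := by
    intro v; simpa using pv_count_singleton v s.toList
  simp only [hc, pv_countP_vowels]
  rw [decide_eq_decide]
  push_cast
  omega
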